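-- pv_equiv track=rewrite | github.com/albertvisser/compare-tool | src/xml_comp.py | getattrval
-- ===== SOURCE A (Python) =====
-- def getattrval(element):
--     """return value of "identifying" attribute
--
--     """
--     default = retval = ''
--     for attr, val in element.items():
--         if not default:
--             default = val
--         for name in ('id', 'name'):
--             if attr == name:
--                 retval = val
--                 break
--     if not retval:
--         retval = default
--     return retval
-- ===== SOURCE B (Python) =====
-- def getattrval(element):
--     """return value of "identifying" attribute"""
--     def first_truthy():
--         for _, v in element.items():
--             if v:
--                 return v
--         return ''
--     for attr, val in reversed(list(element.items())):
--         if attr in ('id', 'name'):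
--             return val if val else first_truthy()
--     return first_truthy()
-- ===== Notes on version B (the rewrite author's own statement) =====
-- stated objective: alternative
-- what changed: Replaces A's forward accumulating fold over a (default, retval) state with an early-returning backwards scan: the last id/name attribute is found as the first match of the reversed item list and returned immediately, falling back lazily to a first-truthy-value helper only when needed.
import Mathlib
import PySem

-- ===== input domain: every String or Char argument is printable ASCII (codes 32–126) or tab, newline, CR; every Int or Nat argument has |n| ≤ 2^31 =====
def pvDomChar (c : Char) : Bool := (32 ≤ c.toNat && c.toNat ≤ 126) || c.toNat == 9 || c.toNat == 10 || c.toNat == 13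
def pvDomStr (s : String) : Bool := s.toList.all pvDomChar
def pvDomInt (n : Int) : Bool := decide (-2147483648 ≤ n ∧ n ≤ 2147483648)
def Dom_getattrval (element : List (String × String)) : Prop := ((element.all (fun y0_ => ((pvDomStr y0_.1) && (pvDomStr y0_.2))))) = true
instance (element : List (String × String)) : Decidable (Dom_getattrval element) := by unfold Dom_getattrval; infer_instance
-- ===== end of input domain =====

-- B replaces A's forward accumulating (default, retval) fold with an early-returning
-- backwards scan for the last id/name attribute, with a lazy first-truthy fallback;
-- objective: alternative (same cost, different traversal/decomposition).

-- ===== PORT A =====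
-- one fold over the items carrying the pair (default, retval), exactly A's loop body
def getattrval (element : List (String × String)) : String :=
  let s := element.foldl
    (fun (s : String × String) p =>
      (if s.1 = "" then p.2 else s.1,
       if p.1 = "id" ∨ p.1 = "name" then p.2 else s.2))
    ("", "")
  if s.2 = "" then s.1 else s.2

-- ===== PORT B =====
-- Source B's inner helper: first truthy value among the items (forward order)
def pvFirstTruthy : List (String × String) → String
  | [] => ""
  | p :: t => if p.2 ≠ "" then p.2 else pvFirstTruthy t

-- Source B's main loop over reversed(list(element.items())) with early return
def pvRevScan (orig : List (String × String)) : List (String × String) → String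
  | [] => pvFirstTruthy orig
  | p :: t =>
      if p.1 = "id" ∨ p.1 = "name" then
        (if p.2 ≠ "" then p.2 else pvFirstTruthy orig)
      else pvRevScan orig t

def getattrval_alt (element : List (String × String)) : String :=
  pvRevScan element element.reverse

-- ===== PRECONDITION & SPEC =====
def Spec_getattrval (element : List (String × String)) (out : String) : Prop := out = getattrval_alt element
instance (element : List (String × String)) (out : String) : Decidable (Spec_getattrval element out) := by unfold Spec_getattrval; infer_instance

-- ===== CLAIM (what is proved, stated in full; the proofs are below) =====
def Claim_equal_getattrval : Prop := ∀ (element : List (String × String)), Dom_getattrval element → Spec_getattrval element (getattrval element)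

-- ===== LEMMAS AND PROOFS =====

theorem pvLoop_fst (l : List (String × String)) : ∀ (d r : String),
    (l.foldl (fun (s : String × String) p =>
      (if s.1 = "" then p.2 else s.1,
       if p.1 = "id" ∨ p.1 = "name" then p.2 else s.2)) (d, r)).1
    = if d = "" then pvFirstTruthy l else d := by
  induction l with
  | nil => intro d r; simp [pvFirstTruthy]
  | cons p t ih =>
    intro d r
    by_cases hd : d = "" <;> by_cases hv : p.2 = "" <;>
      simp [hd, hv, ih, pvFirstTruthy]

theorem pvLoop_snd (l : List (String × String)) : ∀ (d r : String),
    (l.foldl (fun (s : String × String) p =>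
      (if s.1 = "" then p.2 else s.1,
       if p.1 = "id" ∨ p.1 = "name" then p.2 else s.2)) (d, r)).2
    = ((l.filter (fun p => p.1 == "id" || p.1 == "name")).map Prod.snd).getLastD r := by
  induction l with
  | nil => intro d r; simp
  | cons p t ih =>
    intro d r
    simp only [List.foldl_cons, List.filter_cons]
    by_cases hm : p.1 = "id" ∨ p.1 = "name"
    · have hb : (p.1 == "id" || p.1 == "name") = true := by
        rcases hm with h | h <;> simp [h]
      rw [if_pos hm, hb]
      simp only [if_true, List.map_cons, List.getLastD_cons]
      exact ih _ _
    · have hb : (p.1 == "id" || p.1 == "name") = false := by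
        rcases not_or.mp hm with ⟨h1, h2⟩; simp [h1, h2]
      rw [if_neg hm, hb]
      simp only [Bool.false_eq_true, if_false]
      exact ih _ _

-- B's reversed scan, characterised by the first match of the scanned list
theorem pvRevScan_eq (orig : List (String × String)) (l : List (String × String)) :
    pvRevScan orig l
    = match l.find? (fun p => p.1 == "id" || p.1 == "name") with
      | none => pvFirstTruthy orig
      | some p => if p.2 ≠ "" then p.2 else pvFirstTruthy orig := by
  induction l with
  | nil => simp [pvRevScan]
  | cons p t ih =>
    by_cases hm : p.1 = "id" ∨ p.1 = "name"
    · have hb : (p.1 == "id" || p.1 == "name") = true := by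
        rcases hm with h | h <;> simp [h]
      simp [pvRevScan, hm, List.find?, hb]
    · have hb : (p.1 == "id" || p.1 == "name") = false := by
        rcases not_or.mp hm with ⟨h1, h2⟩; simp [h1, h2]
      simp [pvRevScan, hm, List.find?, hb, ih]

theorem pvFind_reverse (l : List (String × String)) (q : String × String → Bool) :
    l.reverse.find? q = (l.filter q).getLast? := by
  induction l with
  | nil => simp
  | cons p t ih =>
    rw [List.reverse_cons, List.find?_append, ih, List.filter_cons]
    cases hq : q p
    · simp [hq]
    · cases h : t.filter q with
      | nil => simp [List.find?, hq]
      | cons a m => simp [List.find?, hq, List.getLast?_cons]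

-- ===== VERDICT (by name: the statement is the Claim_ definition above) =====
theorem getattrval_spec : Claim_equal_getattrval := by
  intro element _
  unfold Spec_getattrval getattrval getattrval_alt
  rw [pvRevScan_eq, pvFind_reverse]
  simp only [pvLoop_fst, pvLoop_snd]
  rcases h : (element.filter (fun p => p.1 == "id" || p.1 == "name")).getLast? with _ | p
  · simp [List.getLastD_eq_getLast?, List.getLast?_map, h]
  · simp only [List.getLastD_eq_getLast?, List.getLast?_map, h, Option.map_some, Option.getD_some]
    by_cases hv : p.2 = "" <;> simp [hv]
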